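-- pv_equiv track=rewrite | github.com/olegJF/Checkio | caps_lock.py | caps_lock
-- ===== SOURCE A (Python) =====
-- def caps_lock(text: str) -> str:
--     new_text = ''
--     CAPSLOCK = -1
--     for char in text:
--         if char in ('a', 'z'):
--             CAPSLOCK *= -1
--         else:
--             if CAPSLOCK < 0:
--                 new_text += char
--             else:
--                 new_text += char.title()
--     return new_text
-- ===== SOURCE B (Python) =====
-- def caps_lock(text: str) -> str:
--     # Split text at every toggle character ('a'/'z'); even-indexed segments
--     # are outside caps-lock, odd-indexed ones inside.
--     segments = ['']
--     for c in text:
--         if c in 'az':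
--             segments.append('')
--         else:
--             segments[-1] += c
--     return ''.join(seg if i % 2 == 0 else ''.join(ch.title() for ch in seg)
--                    for i, seg in enumerate(segments))
-- ===== Notes on version B (the rewrite author's own statement) =====
-- stated objective: alternative
-- what changed: Replaces the stateful CAPSLOCK toggle loop with a split-first pass: the text is split at every 'a'/'z' into segments, then even-indexed segments are passed through and odd-indexed ones are title-cased per character.
import Mathlib
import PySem

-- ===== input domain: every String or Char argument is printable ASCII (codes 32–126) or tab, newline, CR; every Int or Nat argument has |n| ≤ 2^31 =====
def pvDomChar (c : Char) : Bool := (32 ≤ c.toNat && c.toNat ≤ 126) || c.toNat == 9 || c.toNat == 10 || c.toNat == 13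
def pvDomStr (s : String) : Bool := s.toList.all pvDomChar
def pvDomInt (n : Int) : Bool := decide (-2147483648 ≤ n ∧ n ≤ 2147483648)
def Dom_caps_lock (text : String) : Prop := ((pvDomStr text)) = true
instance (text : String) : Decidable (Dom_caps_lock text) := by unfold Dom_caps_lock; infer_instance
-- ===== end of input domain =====

-- B replaces A's stateful CAPSLOCK toggle loop by a split-at-'a'/'z' pass with
-- parity-indexed segment processing (alternative decomposition, same cost).
-- On the ASCII domain, char.title() on a one-character string is upperChar (exact there).

-- ===== PORT A =====
-- the toggle loop: state = (CAPSLOCK as Int, accumulated output)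
def capsLoopA (caps : Int) (acc : List Char) : List Char → List Char
  | [] => acc
  | c :: cs =>
    if c = 'a' ∨ c = 'z' then capsLoopA (caps * -1) acc cs
    else if caps < 0 then capsLoopA caps (acc ++ [c]) cs
    else capsLoopA caps (acc ++ [PySem.Chars.upperChar c]) cs

def caps_lock (text : String) : String :=
  String.ofList (capsLoopA (-1) [] text.toList)

-- ===== PORT B =====
-- the split loop of Source B: state = (finished segments, current last segment)
def splitStep (st : List (List Char) × List Char) (c : Char) : List (List Char) × List Char :=
  if c = 'a' ∨ c = 'z' then (st.1 ++ [st.2], []) else (st.1, st.2 ++ [c])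

-- the join with enumerate-index parity: even index passthrough, odd title-cased per char
def joinSegs (i : Nat) : List (List Char) → List Char
  | [] => []
  | s :: rest => (if i % 2 = 0 then s else s.map PySem.Chars.upperChar) ++ joinSegs (i + 1) rest

def caps_lock_alt (text : String) : String :=
  let st := text.toList.foldl splitStep ([], [])
  String.ofList (joinSegs 0 (st.1 ++ [st.2]))

-- ===== PRECONDITION & SPEC =====
def Spec_caps_lock (text : String) (out : String) : Prop := out = caps_lock_alt text
instance (text : String) (out : String) : Decidable (Spec_caps_lock text out) := by unfold Spec_caps_lock; infer_instance

-- ===== CLAIM (what is proved, stated in full; the proofs are below) =====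
def Claim_equal_caps_lock : Prop := ∀ (text : String), Dom_caps_lock text → Spec_caps_lock text (caps_lock text)

-- ===== LEMMAS AND PROOFS =====

-- reference pure form of A's loop, boolean caps state
def loopA' (b : Bool) : List Char → List Char
  | [] => []
  | c :: cs =>
    if c = 'a' ∨ c = 'z' then loopA' (!b) cs
    else (if b then [PySem.Chars.upperChar c] else [c]) ++ loopA' b cs

-- boolean-parity form of the join
def joinB (b : Bool) : List (List Char) → List Char
  | [] => []
  | s :: rest => (if b then s.map PySem.Chars.upperChar else s) ++ joinB (!b) rest

theorem capsLoopA_eq_loopA' (cs : List Char) : ∀ (acc : List Char) (b : Bool),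
    capsLoopA (if b then 1 else -1) acc cs = acc ++ loopA' b cs := by
  induction cs with
  | nil => intro acc b; simp [capsLoopA, loopA']
  | cons c cs ih =>
    intro acc b
    by_cases h : c = 'a' ∨ c = 'z'
    · have h1 : (if b then (1:Int) else -1) * -1 = (if !b then 1 else -1) := by cases b <;> norm_num
      simp only [capsLoopA, loopA', if_pos h, h1, ih]
    · cases b
      · have h2 := ih (acc ++ [c]) false
        simp only [Bool.false_eq_true, if_false] at h2
        simp [capsLoopA, loopA', h, h2]
      · have h2 := ih (acc ++ [PySem.Chars.upperChar c]) true
        simp only [if_true] at h2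
        simp [capsLoopA, loopA', h, h2]

theorem foldl_splitStep_shift (cs : List Char) : ∀ (d : List (List Char)) (cur : List Char),
    cs.foldl splitStep (d, cur)
      = (d ++ (cs.foldl splitStep ([], cur)).1, (cs.foldl splitStep ([], cur)).2) := by
  induction cs with
  | nil => intro d cur; simp
  | cons c cs ih =>
    intro d cur
    by_cases h : c = 'a' ∨ c = 'z'
    · simp only [List.foldl_cons, splitStep, if_pos h]
      rw [ih (d ++ [cur]) [], ih ([] ++ [cur]) []]
      simp
    · simp only [List.foldl_cons, splitStep, if_neg h]
      exact ih d (cur ++ [c])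

theorem joinB_split (cs : List Char) : ∀ (cur : List Char) (b : Bool),
    joinB b ((cs.foldl splitStep ([], cur)).1 ++ [(cs.foldl splitStep ([], cur)).2])
      = (if b then cur.map PySem.Chars.upperChar else cur) ++ loopA' b cs := by
  induction cs with
  | nil => intro cur b; simp [joinB, loopA']
  | cons c cs ih =>
    intro cur b
    by_cases h : c = 'a' ∨ c = 'z'
    · simp only [List.foldl_cons, splitStep, if_pos h, loopA']
      rw [foldl_splitStep_shift cs ([] ++ [cur]) []]
      have := ih [] (!b)
      simp only [List.map_nil, ite_self, List.nil_append] at this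
      simp [joinB, this]
    · simp only [List.foldl_cons, splitStep, loopA', if_neg h]
      rw [ih (cur ++ [c]) b]
      cases b <;> simp

theorem joinSegs_eq_joinB (segs : List (List Char)) : ∀ (i : Nat),
    joinSegs i segs = joinB (decide (i % 2 ≠ 0)) segs := by
  induction segs with
  | nil => intro i; simp [joinSegs, joinB]
  | cons s rest ih =>
    intro i
    have hpar : (decide ((i + 1) % 2 ≠ 0)) = !(decide (i % 2 ≠ 0)) := by
      rcases Nat.mod_two_eq_zero_or_one i with h | h <;> simp [Nat.add_mod, h]
    simp only [joinSegs, joinB, ih (i + 1), hpar]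
    by_cases h : i % 2 = 0 <;> simp [h]

-- ===== VERDICT (by name: the statement is the Claim_ definition above) =====
theorem caps_lock_spec : Claim_equal_caps_lock := by
  intro text _
  unfold Spec_caps_lock caps_lock caps_lock_alt
  show String.ofList (capsLoopA (-1) [] text.toList)
    = String.ofList (joinSegs 0 ((text.toList.foldl splitStep ([], [])).1
        ++ [(text.toList.foldl splitStep ([], [])).2]))
  rw [joinSegs_eq_joinB]
  have hA := capsLoopA_eq_loopA' text.toList [] false
  simp only [Bool.false_eq_true, if_false, List.nil_append] at hA
  have hB := joinB_split text.toList [] false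
  simp only [List.map_nil, ite_self, List.nil_append] at hB
  rw [hA, show (decide ((0:Nat) % 2 ≠ 0)) = false from by decide, hB]
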